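-- pv_equiv track=rewrite | github.com/johnurb/find-columnar-keys | KeywordSolver.py | order_word
-- ===== SOURCE A (Python) =====
-- def order_word(word):
--     letterValues = []
--     for letter in word:
--         letterValues.append(ord(letter))
--
--     letterValuesSorted = sorted(letterValues)
--
--     placeData = {}
--     for i in range(len(letterValues)):
--         placeData[letterValuesSorted[i]] = i+1
--
--     letterRanks = []
--     for i in range(len(letterValues)):
--         for k,v in placeData.items():
--             if k == letterValues[i]:
--                 letterRanks.append(v)
--
--     for i in range(1,len(letterRanks)):
--         if letterRanks[i] == letterRanks[i-1]:
--             letterRanks[i-1] = letterRanks[i] - 1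
--
--     return letterRanks
-- ===== SOURCE B (Python) =====
-- def order_word(word):
--     vals = [ord(c) for c in word]
--     letterRanks = [sum(v <= x for v in vals) for x in vals]
--     for i in range(1, len(letterRanks)):
--         if letterRanks[i] == letterRanks[i-1]:
--             letterRanks[i-1] = letterRanks[i] - 1
--     return letterRanks
-- ===== Notes on version B (the rewrite author's own statement) =====
-- stated objective: simpler
-- what changed: Replaced the sort + rank-dict + dict-scan pipeline by a direct counting pass: each letter's rank is the number of letters with ord <= its own, computed by one comprehension; the final fix-up loop is kept verbatim.
import Mathlib
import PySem

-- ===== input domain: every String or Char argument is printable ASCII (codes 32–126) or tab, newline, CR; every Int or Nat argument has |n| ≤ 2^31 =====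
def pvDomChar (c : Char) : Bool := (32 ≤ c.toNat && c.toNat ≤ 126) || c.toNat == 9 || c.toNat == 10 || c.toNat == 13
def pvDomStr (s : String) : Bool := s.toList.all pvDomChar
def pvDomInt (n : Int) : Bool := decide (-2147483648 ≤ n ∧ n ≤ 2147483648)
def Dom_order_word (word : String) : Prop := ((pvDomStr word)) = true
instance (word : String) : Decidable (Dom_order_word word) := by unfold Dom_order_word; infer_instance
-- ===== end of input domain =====

-- B replaces A's sort + rank-dict + dict-scan by a direct counting pass (rank = number of letters with ord ≤ own); the final fix-up loop is identical in both sources.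

-- shared helper: the final fix-up loop, written identically in both Python sources
def pvFixup (r0 : List Int) : List Int :=
  (PySem.List.pyRange 1 (r0.length : Int) 1).foldl
    (fun r i =>
      if PySem.List.pyGetD r i 0 == PySem.List.pyGetD r (i - 1) 0 then
        r.set (i - 1).toNat (PySem.List.pyGetD r i 0 - 1)
      else r) r0

-- ===== PORT A =====
def order_word (word : String) : List Int :=
  let letterValues : List Int := word.toList.foldl (fun acc c => acc ++ [(c.toNat : Int)]) []
  let letterValuesSorted : List Int := PySem.List.sorted letterValues (fun x => x) false
  let placeData : PySem.Dict Int Int :=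
    (PySem.List.pyRange 0 (letterValues.length : Int) 1).foldl
      (fun d i => d.insert (PySem.List.pyGetD letterValuesSorted i 0) (i + 1)) PySem.Dict.empty
  let letterRanks : List Int :=
    (PySem.List.pyRange 0 (letterValues.length : Int) 1).foldl
      (fun acc i =>
        placeData.items.foldl
          (fun acc kv =>
            if kv.1 == PySem.List.pyGetD letterValues i 0 then acc ++ [kv.2] else acc) acc) []
  pvFixup letterRanks

-- ===== PORT B =====
def order_word_alt (word : String) : List Int :=
  let vals : List Int := word.toList.map (fun c => (c.toNat : Int))
  let letterRanks : List Int :=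
    vals.map (fun x => (vals.map (fun v => if v ≤ x then (1 : Int) else 0)).sum)
  pvFixup letterRanks

-- ===== PRECONDITION & SPEC =====
def Spec_order_word (word : String) (out : List Int) : Prop := out = order_word_alt word
instance (word : String) (out : List Int) : Decidable (Spec_order_word word out) := by unfold Spec_order_word; infer_instance

-- ===== CLAIM (what is proved, stated in full; the proofs are below) =====
def Claim_equal_order_word : Prop := ∀ (word : String), Dom_order_word word → Spec_order_word word (order_word word)

-- ===== LEMMAS AND PROOFS =====

-- A's rank dict: placeData, built by overwriting inserts over the sorted values
def pvD (s : List Int) : PySem.Dict Int Int :=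
  (PySem.List.enumerate s 0).foldl (fun d p => d.insert p.2 (p.1 + 1)) PySem.Dict.empty

lemma pvD_eq_pyRange (s : List Int) :
    (PySem.List.pyRange 0 (s.length : Int) 1).foldl
      (fun d i => d.insert (PySem.List.pyGetD s i 0) (i + 1)) PySem.Dict.empty = pvD s := by
  rw [pvD, PySem.List.enumerate_eq_map_pyRange (d := 0), List.foldl_map]
  simp [PySem.List.len_eq]

lemma pvD_keys_mem (s : List Int) (x : Int) : x ∈ (pvD s).keys ↔ x ∈ s := by
  rw [pvD, PySem.Dict.keys_foldl_insert_key]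
  simp [PySem.Set.mem_update, PySem.List.map_snd_enumerate, PySem.Dict.keys_empty]

lemma pvD_keys_nodup (s : List Int) : (pvD s).keys.Nodup := by
  rw [pvD]
  exact PySem.Dict.nodup_keys_foldl_insert_key _ _ _ _ (by simp [PySem.Dict.keys_empty])

-- on a ≤-sorted list, the surviving (last) insert for key x is its 1-based rank = #{v | v ≤ x}
lemma pvD_getD (s : List Int) (hs : s.Pairwise (· ≤ ·)) (x : Int) (hx : x ∈ s) :
    (pvD s).getD x 0 = (s.countP (fun v => decide (v ≤ x)) : Int) := by
  induction s using List.reverseRecOn with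
  | nil => simp at hx
  | append_singleton t a ih =>
    rw [List.pairwise_append] at hs
    obtain ⟨ht, -, hta⟩ := hs
    have hta' : ∀ y ∈ t, y ≤ a := fun y hy => hta y hy a (by simp)
    rw [pvD, PySem.List.enumerate_append, List.foldl_append]
    simp only [PySem.List.enumerate, List.foldl_cons, List.foldl_nil]
    rw [show ((PySem.List.enumerate t 0).foldl (fun d p => d.insert p.2 (p.1 + 1)) PySem.Dict.empty) = pvD t from rfl]
    by_cases hxa : x = a
    · subst hxa
      rw [PySem.Dict.getD_insert_self]
      have : t.countP (fun v => decide (v ≤ x)) = t.length := by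
        rw [List.countP_eq_length]
        intro y hy; simp [hta' y hy]
      simp [List.countP_append, this]
    · have hxt : x ∈ t := by rcases List.mem_append.mp hx with h | h; exact h; simp at h; omega
      rw [PySem.Dict.getD_insert_of_ne (hne := hxa)]
      rw [ih ht hxt]
      have hlt : x < a := lt_of_le_of_ne (hta' x hxt) hxa
      simp [List.countP_append, show ¬ (a ≤ x) from by omega]

lemma pv_filter_beq_of_nodup (l : List Int) (h : l.Nodup) (x : Int) (hx : x ∈ l) :
    l.filter (fun k => k == x) = [x] := by
  induction l with
  | nil => simp at hx
  | cons a t ih =>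
    rcases List.mem_cons.mp hx with rfl | hxt
    · have hnx : x ∉ t := (List.nodup_cons.mp h).1
      have : t.filter (fun k => k == x) = [] := by
        rw [List.filter_eq_nil_iff]
        intro b hb hbx
        exact hnx (beq_iff_eq.mp hbx ▸ hb)
      simp [this]
    · have hax : ¬ (a == x) = true := by
        simp only [beq_iff_eq]; rintro rfl; exact (List.nodup_cons.mp h).1 hxt
      simp [hax, ih (List.nodup_cons.mp h).2 hxt]

-- scanning the items of a nodup-keyed dict for key x yields exactly its stored value
lemma pv_items_filter (d : PySem.Dict Int Int) (hnd : d.keys.Nodup) (x : Int) (hx : x ∈ d.keys) :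
    (d.items.filter (fun kv => kv.1 == x)).map (·.2) = [d.getD x 0] := by
  rw [PySem.Dict.items_eq_map_keys d hnd 0, List.filter_map]
  rw [show ((fun kv : Int × Int => kv.1 == x) ∘ fun k => (k, d.getD k 0)) = (fun k => k == x) from rfl]
  rw [pv_filter_beq_of_nodup d.keys hnd x hx]
  simp

lemma pv_foldl_single (l : List Int) (F : List Int → Int → List Int) (g : Int → Int)
    (h : ∀ acc x, x ∈ l → F acc x = acc ++ [g x]) :
    ∀ init, l.foldl F init = init ++ l.map g := by
  induction l with
  | nil => simp
  | cons a t ih =>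
    intro init
    rw [List.foldl_cons, h init a (by simp), ih (fun acc x hx => h acc x (by simp [hx]))]
    simp

-- A's pre-fix-up ranks list is exactly the inclusive-count ranks
lemma pv_ranksA (vals : List Int) :
    (PySem.List.pyRange 0 (vals.length : Int) 1).foldl
      (fun acc i =>
        (pvD (PySem.List.sorted vals (fun x => x) false)).items.foldl
          (fun acc kv => if kv.1 == PySem.List.pyGetD vals i 0 then acc ++ [kv.2] else acc) acc) []
    = vals.map (fun x => (vals.countP (fun v => decide (v ≤ x)) : Int)) := by
  set s := PySem.List.sorted vals (fun x => x) false with hsdef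
  have hperm : s.Perm vals := PySem.List.sorted_perm vals (fun x => x) false
  have hpw : s.Pairwise (· ≤ ·) := PySem.List.sorted_pairwise vals (fun x => x)
  rw [PySem.List.foldl_pyRange_zero_pyGetD' vals 0
    (fun acc x => (pvD s).items.foldl (fun acc kv => if kv.1 == x then acc ++ [kv.2] else acc) acc) []]
  rw [pv_foldl_single vals _ (fun x => (vals.countP (fun v => decide (v ≤ x)) : Int))]
  · simp
  · intro acc x hx
    rw [PySem.List.foldl_append_if (fun kv : Int × Int => kv.1 == x) (fun kv => kv.2)]
    rw [pv_items_filter (pvD s) (pvD_keys_nodup s) x ((pvD_keys_mem s x).mpr (hperm.mem_iff.mpr hx))]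
    rw [pvD_getD s hpw x (hperm.mem_iff.mpr hx), hperm.countP_eq]

lemma pvD_eq_pyRange' (vals : List Int) :
    (PySem.List.pyRange 0 (vals.length : Int) 1).foldl
      (fun d i => d.insert (PySem.List.pyGetD (PySem.List.sorted vals (fun x => x) false) i 0) (i + 1))
      PySem.Dict.empty = pvD (PySem.List.sorted vals (fun x => x) false) := by
  rw [show (vals.length : Int) = ((PySem.List.sorted vals (fun x => x) false).length : Int) by
    rw [PySem.List.length_sorted]]
  exact pvD_eq_pyRange _

theorem order_word_eq_alt (word : String) : order_word word = order_word_alt word := by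
  rw [order_word, order_word_alt]
  have hvals : word.toList.foldl (fun acc c => acc ++ [(c.toNat : Int)]) [] =
      word.toList.map (fun c => (c.toNat : Int)) := by
    simpa using PySem.List.foldl_append_singleton_eq_map (fun c : Char => (c.toNat : Int)) word.toList []
  simp only [hvals]
  set vals := word.toList.map (fun c => (c.toNat : Int)) with hv
  congr 1
  rw [pvD_eq_pyRange', pv_ranksA]
  apply List.map_congr_left
  intro x hx
  rw [show (fun v : Int => if v ≤ x then (1 : Int) else 0)
        = (fun v : Int => if decide (v ≤ x) = true then (1 : Int) else 0) by funext v; simp]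
  rw [PySem.List.sum_map_ite_one_zero]

-- ===== VERDICT (by name: the statement is the Claim_ definition above) =====
theorem order_word_spec : Claim_equal_order_word := by
  intro word _
  unfold Spec_order_word
  exact order_word_eq_alt word
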